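-- pv_equiv track=rewrite | github.com/EdoardoMarchetti/computer-aided-sim | 2048/board.py | compact_right
-- ===== SOURCE A (Python) =====
-- def compact_right(a: list) -> tuple[list, int, int]:
--     score = 0
--     n_cell_removed = 0
--     start = 0
--     end = len(a)-1
--     i = start
--     while i < end:
--         if a[i] == a[i+1]:
--             a[i+1] += a[i]
--             score += a[i+1]
--             n_cell_removed += 1
--             j = i
--             while j>start:
--                 a[j] = a[j-1]
--                 j -= 1
--             start += 1
--             i += 1
--         i += 1
--     return a[start:], score, n_cell_removed
-- ===== SOURCE B (Python) =====
-- def compact_right(a: list) -> tuple[list, int, int]: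
--     # Single left-to-right pass building a fresh result list (does not
--     # mutate `a`, unlike the original, whose in-place shifting is not
--     # part of the return-value equivalence claimed here).
--     res = []
--     score = 0
--     n_cell_removed = 0
--     n = len(a)
--     i = 0
--     while i + 1 < n:
--         if a[i] == a[i + 1]:
--             v = a[i] + a[i + 1]
--             res.append(v)
--             score += v
--             n_cell_removed += 1
--             i += 2
--         else:
--             res.append(a[i])
--             i += 1
--     if i + 1 == n:
--         res.append(a[n - 1])
--     return res, score, n_cell_removed
-- ===== Notes on version B (the rewrite author's own statement) =====
-- stated objective: faster
-- what changed: Replaced the in-place merge with an O(n^2) inner shifting loop by a single left-to-right pass that appends to a fresh result list, merging equal adjacent pairs and skipping two positions; no mutation of the input (return-value equivalence only).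
import Mathlib
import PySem

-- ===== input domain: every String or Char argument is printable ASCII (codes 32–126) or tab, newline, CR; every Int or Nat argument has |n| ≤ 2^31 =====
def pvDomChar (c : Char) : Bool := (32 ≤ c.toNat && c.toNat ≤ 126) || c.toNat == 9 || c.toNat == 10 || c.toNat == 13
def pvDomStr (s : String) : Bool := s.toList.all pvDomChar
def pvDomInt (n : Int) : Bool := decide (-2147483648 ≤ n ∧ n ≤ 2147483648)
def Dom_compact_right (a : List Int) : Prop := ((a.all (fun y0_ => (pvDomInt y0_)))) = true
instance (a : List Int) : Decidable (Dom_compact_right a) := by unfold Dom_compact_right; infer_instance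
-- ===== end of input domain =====

-- B replaces A's in-place merge with its inner shifting loop by a single left-to-right
-- pass appending to a fresh result list; A mutates its argument in place, B does not —
-- the equivalence proved here is about the RETURN value only.

-- ===== PORT A =====
-- inner `while j > start: a[j] = a[j-1]; j -= 1` (all indices provably in range, so
-- Python's a[j] is List.getD here)
def shiftLoopA (a : List Int) (j start : Nat) : List Int :=
  if _h : start < j then shiftLoopA (a.set j (a.getD (j-1) 0)) (j-1) start else a

-- outer while loop; Python's `i < end` with end = len(a)-1 is exactly `i+1 < n` for the
-- nonnegative i it maintains, and a[i], a[i+1] are in range there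
def loopA (a : List Int) (score removed : Int) (start i n : Nat) :
    List Int × Int × Int × Nat :=
  if _h : i + 1 < n then
    if a.getD i 0 = a.getD (i+1) 0 then
      let a1 := a.set (i+1) (a.getD (i+1) 0 + a.getD i 0)
      let score1 := score + a1.getD (i+1) 0
      let a2 := shiftLoopA a1 i start
      loopA a2 score1 (removed + 1) (start + 1) (i + 2) n
    else
      loopA a score removed start (i + 1) n
  else (a, score, removed, start)
termination_by n - i

def compact_right (a : List Int) : List Int × Int × Int :=
  match loopA a 0 0 0 0 a.length with
  | (a', score, removed, start) => (a'.drop start, score, removed)  -- a[start:], start ≥ 0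

-- ===== PORT B =====
-- Source B's single pass over indices; `i + 1 < n` / `i + 1 = n` are its int comparisons
-- `i < n-1` / `i == n-1`, all reads in range (a[n-1] is Python's a[-1] there since n ≥ 1)
def loopB (a : List Int) (n : Nat) (res : List Int) (score removed : Int) (i : Nat) :
    List Int × Int × Int :=
  if _h : i + 1 < n then
    if a.getD i 0 = a.getD (i+1) 0 then
      let v := a.getD i 0 + a.getD (i+1) 0
      loopB a n (res ++ [v]) (score + v) (removed + 1) (i + 2)
    else
      loopB a n (res ++ [a.getD i 0]) score removed (i + 1)
  else
    (if i + 1 = n then res ++ [a.getD (n-1) 0] else res, score, removed)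
termination_by n - i

def compact_right_alt (a : List Int) : List Int × Int × Int :=
  loopB a a.length [] 0 0 0

-- ===== PRECONDITION & SPEC =====
def Spec_compact_right (a : List Int) (out : List Int × Int × Int) : Prop := out = compact_right_alt a
instance (a : List Int) (out : List Int × Int × Int) : Decidable (Spec_compact_right a out) := by unfold Spec_compact_right; infer_instance

-- ===== CLAIM (what is proved, stated in full; the proofs are below) =====
def Claim_equal_compact_right : Prop := ∀ (a : List Int), Dom_compact_right a → Spec_compact_right a (compact_right a)

-- ===== LEMMAS AND PROOFS =====

theorem shiftA_len : ∀ (j : Nat) (a : List Int) (start : Nat),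
    (shiftLoopA a j start).length = a.length := by
  intro j
  induction j using Nat.strong_induction_on with
  | _ j ih =>
    intro a start
    rw [shiftLoopA]
    split
    · next h => rw [ih (j-1) (by omega)]; simp
    · rfl

-- closed form of the inner shifting loop, seen from index `start` on
theorem shiftA_eq (start : Nat) : ∀ (d : Nat) (a : List Int), start + d < a.length →
    shiftLoopA a (start + d) start =
      a.take start ++ a.getD start 0 :: ((a.drop start).take d ++ a.drop (start + d + 1)) := by
  intro d
  induction d with
  | zero =>
    intro a h
    rw [shiftLoopA, dif_neg (by omega)]
    rw [List.getD_eq_getElem a 0 (by omega)]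
    have h1 : a.drop start = a[start] :: a.drop (start+1) :=
      List.drop_eq_getElem_cons (by omega)
    calc a = a.take start ++ a.drop start := (List.take_append_drop _ _).symm
      _ = _ := by rw [h1]; simp
  | succ d ih =>
    intro a h
    rw [shiftLoopA, dif_pos (by omega)]
    have e1 : start + (d + 1) - 1 = start + d := by omega
    rw [e1]
    set x : Int := a.getD (start + d) 0 with hx
    have hlen : (a.set (start + (d+1)) x).length = a.length := by simp
    rw [ih _ (by rw [hlen]; omega)]
    have e2 : start + (d + 1) = start + d + 1 := by omega
    rw [e2]
    -- piece 1: take start unchanged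
    have p1 : (a.set (start+d+1) x).take start = a.take start :=
      List.take_set_of_le (by omega)
    -- piece 2: getD start unchanged
    have p2 : (a.set (start+d+1) x).getD start 0 = a.getD start 0 := by
      rw [List.getD_eq_getElem?_getD, List.getD_eq_getElem?_getD,
        List.getElem?_set_ne (by omega)]
    -- piece 3: the copied segment's first d entries unchanged
    have p3 : ((a.set (start+d+1) x).drop start).take d = (a.drop start).take d := by
      rw [List.drop_set, if_neg (by omega)]
      exact List.take_set_of_le (by omega)
    -- piece 4: the tail from start+d+1 gains x in front
    have p4 : (a.set (start+d+1) x).drop (start+d+1) = x :: a.drop (start+d+2) := by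
      rw [List.drop_set, if_neg (by omega)]
      rw [Nat.sub_self]
      have h1 : a.drop (start+d+1) = a[start+d+1] :: a.drop (start+d+2) :=
        List.drop_eq_getElem_cons (by omega)
      rw [h1]
      rfl
    rw [p1, p2, p3, p4]
    -- the right-hand side's take (d+1) splits off x
    have p5 : (a.drop start).take (d+1) = (a.drop start).take d ++ [x] := by
      rw [List.take_add_one, List.getElem?_drop,
        List.getElem?_eq_getElem (by omega), hx,
        List.getD_eq_getElem a 0 (by omega)]
      rfl
    rw [p5]
    simp

-- loopA's state, read through drop start, tracks loopB's result list exactly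
theorem loopAB (a0 : List Int) :
    ∀ (k i start : Nat) (a res : List Int) (score removed : Int),
      a0.length - i ≤ k → start ≤ i → a.length = a0.length →
      res.length = i - start → a.drop start = res ++ a0.drop i →
      (match loopA a score removed start i a0.length with
       | (a', s, r, st) => (a'.drop st, s, r)) = loopB a0 a0.length res score removed i := by
  intro k
  induction k with
  | zero =>
    intro i start a res score removed hk hsi hlen hres hinv
    have hni : a0.length ≤ i := by omega
    rw [loopA, dif_neg (by omega), loopB, dif_neg (by omega), if_neg (by omega)]
    simp only
    rw [hinv, List.drop_eq_nil_of_le hni, List.append_nil]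
  | succ k ih =>
    intro i start a res score removed hk hsi hlen hres hinv
    by_cases hlt : i + 1 < a0.length
    · -- the segment from i on is still the original list
      have hdropi : a.drop i = a0.drop i := by
        have h1 := congrArg (List.drop (i - start)) hinv
        rw [List.drop_drop] at h1
        have e : start + (i - start) = i := by omega
        rw [e] at h1
        rw [h1, ← hres, List.drop_left]
      have gi : a.getD i 0 = a0.getD i 0 := by
        rw [List.getD_eq_getElem?_getD, List.getD_eq_getElem?_getD,
          ← Nat.add_zero i, ← List.getElem?_drop, ← List.getElem?_drop, hdropi]
      have hdropi1 : a.drop (i+1) = a0.drop (i+1) := by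
        have h1 := congrArg (List.drop 1) hdropi
        rwa [List.drop_drop, List.drop_drop] at h1
      have gi1 : a.getD (i+1) 0 = a0.getD (i+1) 0 := by
        rw [List.getD_eq_getElem?_getD, List.getD_eq_getElem?_getD,
          ← Nat.add_zero (i+1), ← List.getElem?_drop, ← List.getElem?_drop, hdropi1]
      rw [loopA, dif_pos hlt, loopB, dif_pos hlt]
      by_cases heq : a0.getD i 0 = a0.getD (i+1) 0
      · rw [if_pos (by rw [gi, gi1]; exact heq), if_pos heq]
        simp only
        set xA : Int := a.getD (i+1) 0 + a.getD i 0 with hxA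
        set a1 : List Int := a.set (i+1) xA with ha1
        have hlen1 : a1.length = a0.length := by rw [ha1, List.length_set, hlen]
        have hg1 : a1.getD (i+1) 0 = xA := by
          rw [List.getD_eq_getElem a1 0 (by omega)]
          exact List.getElem_set_self _
        -- apply the closed form of the shift with d = i - start
        have hd : start + (i - start) = i := by omega
        have hsf : shiftLoopA a1 i start =
            a1.take start ++ a1.getD start 0 ::
              ((a1.drop start).take (i - start) ++ a1.drop (i+1)) := by
          have h2 := shiftA_eq start (i - start) a1 (by rw [hlen1]; omega)
          rw [hd] at h2
          exact h2
        -- the copied segment is exactly res, the tail gains the merged cell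
        have pt : (a1.drop start).take (i - start) = res := by
          rw [ha1, List.drop_set, if_neg (by omega),
            List.take_set_of_le (by omega), hinv, ← hres, List.take_left]
        have pu : a1.drop (i+1) = xA :: a0.drop (i+2) := by
          rw [ha1, List.drop_set, if_neg (by omega), hdropi1,
            List.drop_eq_getElem_cons (show i+1 < a0.length by omega), Nat.sub_self]
          rfl
        have htl : (a1.take start).length = start := by
          rw [List.length_take]; omega
        have hsuf : (shiftLoopA a1 i start).drop (start + 1) =
            (res ++ [xA]) ++ a0.drop (i + 2) := by
          rw [hsf, pt, pu, show start + 1 = (a1.take start).length + 1 by rw [htl],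
            List.drop_length_add_append 1]
          simp
        have hv : xA = a0.getD i 0 + a0.getD (i+1) 0 := by
          rw [hxA, gi, gi1]; ring
        rw [hg1, hv]
        apply ih (i+2) (start+1) (shiftLoopA a1 i start)
          (res ++ [a0.getD i 0 + a0.getD (i+1) 0]) _ _
          (by omega) (by omega) (by rw [shiftA_len, hlen1]) (by simp; omega)
        rw [hsuf, hv]
      · rw [if_neg (by rw [gi, gi1]; exact heq), if_neg heq]
        simp only
        apply ih (i+1) start a (res ++ [a0.getD i 0]) score removed
          (by omega) (by omega) hlen (by simp; omega)
        rw [hinv]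
        have h1 : a0.drop i = a0[i] :: a0.drop (i+1) :=
          List.drop_eq_getElem_cons (by omega)
        rw [h1, List.getD_eq_getElem a0 0 (by omega)]
        simp
    · rw [loopA, dif_neg hlt, loopB, dif_neg hlt]
      simp only
      by_cases hn : i + 1 = a0.length
      · rw [if_pos hn, hinv]
        have h1 : a0.drop i = a0[i] :: a0.drop (i+1) :=
          List.drop_eq_getElem_cons (by omega)
        have h2 : a0.drop (i+1) = [] := List.drop_eq_nil_of_le (by omega)
        rw [show a0.length - 1 = i from by omega, h1, h2,
          List.getD_eq_getElem a0 0 (by omega)]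
      · rw [if_neg hn, hinv, List.drop_eq_nil_of_le (by omega), List.append_nil]

-- ===== VERDICT (by name: the statement is the Claim_ definition above) =====
theorem compact_right_spec : Claim_equal_compact_right := by
  intro a _
  unfold Spec_compact_right compact_right compact_right_alt
  exact loopAB a a.length 0 0 a [] 0 0 (by omega) (by omega) rfl (by simp) (by simp)
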